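-- pv_equiv track=rewrite | github.com/SubinHan/baam-python-study | ThreeSum.py | count_three_sum_zero
-- ===== SOURCE A (Python) =====
-- def count_three_sum_zero(nums):
--     """
--     Counts the number of unique triplets (i < j < k) in nums that sum to zero using a brute-force approach.
--     """
--     count = 0
--     n = len(nums)
--     for i in range(n-2):
--         for j in range(i+1, n-1):
--             for k in range(j+1, n):
--                 if nums[i] + nums[j] + nums[k] == 0:
--                     count += 1
--     return count
-- ===== SOURCE B (Python) =====
-- def count_three_sum_zero(nums):
--     """
--     Counts index triplets (i < j < k) with nums[i] + nums[j] + nums[k] == 0 in O(n^2):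
--     scan the middle index j keeping a running counter of the values before j; for each
--     later k, the number of valid i is the counter's count of -(nums[j] + nums[k]).
--     """
--     count = 0
--     seen = {}
--     n = len(nums)
--     for j in range(n):
--         x = nums[j]
--         for k in range(j + 1, n):
--             count += seen.get(-(x + nums[k]), 0)
--         seen[x] = seen.get(x, 0) + 1
--     return count
-- ===== Notes on version B (the rewrite author's own statement) =====
-- stated objective: faster
-- what changed: Replaced the cubic triple loop with a quadratic middle-index scan: a running hash counter of the prefix values replaces the innermost loop over i.
import Mathlib
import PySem

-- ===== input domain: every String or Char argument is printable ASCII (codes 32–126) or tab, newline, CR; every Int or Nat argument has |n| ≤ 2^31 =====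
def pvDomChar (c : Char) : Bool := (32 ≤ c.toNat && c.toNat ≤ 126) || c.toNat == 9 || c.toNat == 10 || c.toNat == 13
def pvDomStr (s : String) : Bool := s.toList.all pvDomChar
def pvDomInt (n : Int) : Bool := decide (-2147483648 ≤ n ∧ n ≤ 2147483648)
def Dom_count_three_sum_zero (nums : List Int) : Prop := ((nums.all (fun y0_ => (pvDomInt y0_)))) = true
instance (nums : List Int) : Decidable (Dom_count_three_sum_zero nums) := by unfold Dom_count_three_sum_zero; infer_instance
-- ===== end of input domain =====

-- B replaces A's cubic triple loop by a quadratic middle-index scan with a running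
-- counter of prefix values (objective: faster, asymptotic O(n^3) -> O(n^2)).


-- ===== PORT A =====
def count_three_sum_zero (nums : List Int) : Int :=
  let n := PySem.List.len nums
  (PySem.List.pyRange 0 (n - 2)).foldl (fun count i =>
    (PySem.List.pyRange (i + 1) (n - 1)).foldl (fun count j =>
      (PySem.List.pyRange (j + 1) n).foldl (fun count k =>
        if PySem.List.pyGetD nums i 0 + PySem.List.pyGetD nums j 0 + PySem.List.pyGetD nums k 0 = 0
        then count + 1 else count) count) count) 0

-- ===== PORT B =====
def count_three_sum_zero_alt (nums : List Int) : Int :=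
  let n := PySem.List.len nums
  let st := (PySem.List.pyRange 0 n).foldl
    (fun (st : Int × PySem.Dict Int Int) j =>
      let x := PySem.List.pyGetD nums j 0
      let count := (PySem.List.pyRange (j + 1) n).foldl
        (fun c k => c + st.2.getD (-(x + PySem.List.pyGetD nums k 0)) 0) st.1
      (count, st.2.modify x 0 (fun t => t + 1)))
    (0, PySem.Dict.mk [])
  st.1

-- ===== PRECONDITION & SPEC =====
def Spec_count_three_sum_zero (nums : List Int) (out : Int) : Prop := out = count_three_sum_zero_alt nums
instance (nums : List Int) (out : Int) : Decidable (Spec_count_three_sum_zero nums out) := by unfold Spec_count_three_sum_zero; infer_instance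

-- ===== CLAIM (what is proved, stated in full; the proofs are below) =====
def Claim_equal_count_three_sum_zero : Prop := ∀ (nums : List Int), Dom_count_three_sum_zero nums → Spec_count_three_sum_zero nums (count_three_sum_zero nums)

-- ===== LEMMAS AND PROOFS =====

-- value at index t (all indices used are in range, so the default is never read)
def tsGet (nums : List Int) (t : Int) : Int := PySem.List.pyGetD nums t 0

-- 0/1 indicator of "i < j < k and the three values sum to zero"
def tsInd (nums : List Int) (i j k : Int) : Int :=
  if i < j ∧ j < k ∧ tsGet nums i + tsGet nums j + tsGet nums k = 0 then 1 else 0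

-- the counter dict B has built after processing the first m elements
def tsCnt (nums : List Int) (m : Nat) : PySem.Dict Int Int :=
  (nums.take m).foldl (fun d x => d.modify x 0 (fun t => t + 1)) (PySem.Dict.mk [])

-- the count B has accumulated after processing the first m middle indices
noncomputable def tsBsum (nums : List Int) (m : Nat) : Int :=
  ∑ j ∈ Finset.Ico (0 : Int) (m : Int), ∑ k ∈ Finset.Ico (j + 1) (nums.length : Int),
    ((nums.take j.toNat).count (-(tsGet nums j + tsGet nums k)) : Int)

lemma tsRange_nil {a b : Int} (h : b ≤ a) : PySem.List.pyRange a b = [] := by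
  refine List.eq_nil_iff_forall_not_mem.mpr fun x hx => ?_
  have := PySem.List.mem_pyRange_one.mp hx; omega

lemma tsSum_Ico_top (a b : Int) (h : a ≤ b) (f : Int → Int) :
    ∑ k ∈ Finset.Ico a (b + 1), f k = (∑ k ∈ Finset.Ico a b, f k) + f b := by
  rw [show Finset.Ico a (b + 1) = insert b (Finset.Ico a b) by ext t; simp; omega,
    Finset.sum_insert (by simp)]
  omega

lemma tsSum_map_pyRange (g : Int → Int) (a b : Int) :
    ((PySem.List.pyRange a b).map g).sum = ∑ t ∈ Finset.Ico a b, g t := by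
  by_cases hab : a ≤ b
  · induction b, hab using Int.le_induction with
    | base => rw [tsRange_nil le_rfl, Finset.Ico_self]; simp
    | succ b hb ih =>
      rw [PySem.List.pyRange_one_succ_right hb, List.map_append, List.sum_append,
        tsSum_Ico_top a b hb g, ih]
      simp
  · rw [tsRange_nil (by omega), Finset.Ico_eq_empty (by omega)]; simp

lemma tsSum_Ico_extend (f : Int → Int) (a b A B : Int) (hA : A ≤ a) (hB : b ≤ B) :
    ∑ t ∈ Finset.Ico a b, f t = ∑ t ∈ Finset.Ico A B, if a ≤ t ∧ t < b then f t else 0 := by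
  rw [← Finset.sum_filter]
  congr 1
  ext t; simp; omega

lemma tsFoldl_ite_add (p : Int → Prop) [DecidablePred p] (l : List Int) (c : Int) :
    l.foldl (fun acc x => if p x then acc + 1 else acc) c
      = c + (l.map fun x => if p x then (1 : Int) else 0).sum := by
  induction l generalizing c with
  | nil => simp
  | cons x t ih =>
    simp only [List.foldl_cons, List.map_cons, List.sum_cons, ih]
    split_ifs <;> ring

-- A's nested loops, as nested interval sums
lemma tsA_eq (nums : List Int) :
    count_three_sum_zero nums
      = ∑ i ∈ Finset.Ico (0 : Int) ((nums.length : Int) - 2),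
          ∑ j ∈ Finset.Ico (i + 1) ((nums.length : Int) - 1),
            ∑ k ∈ Finset.Ico (j + 1) (nums.length : Int),
              if tsGet nums i + tsGet nums j + tsGet nums k = 0 then (1 : Int) else 0 := by
  simp only [count_three_sum_zero, PySem.List.len, tsGet]
  set n : Int := (nums.length : Int) with hn
  have h1 : ∀ (c i j : Int),
      (PySem.List.pyRange (j + 1) n).foldl
        (fun count k =>
          if PySem.List.pyGetD nums i 0 + PySem.List.pyGetD nums j 0 + PySem.List.pyGetD nums k 0 = 0
          then count + 1 else count) c
        = c + ∑ k ∈ Finset.Ico (j + 1) n,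
            (if PySem.List.pyGetD nums i 0 + PySem.List.pyGetD nums j 0 + PySem.List.pyGetD nums k 0 = 0
             then (1 : Int) else 0) := by
    intro c i j
    rw [tsFoldl_ite_add, tsSum_map_pyRange]
  have h2 : ∀ (c i : Int),
      (PySem.List.pyRange (i + 1) (n - 1)).foldl
        (fun count j =>
          (PySem.List.pyRange (j + 1) n).foldl
            (fun count k =>
              if PySem.List.pyGetD nums i 0 + PySem.List.pyGetD nums j 0 + PySem.List.pyGetD nums k 0 = 0
              then count + 1 else count) count) c
        = c + ∑ j ∈ Finset.Ico (i + 1) (n - 1), ∑ k ∈ Finset.Ico (j + 1) n,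
            (if PySem.List.pyGetD nums i 0 + PySem.List.pyGetD nums j 0 + PySem.List.pyGetD nums k 0 = 0
             then (1 : Int) else 0) := by
    intro c i
    rw [PySem.List.foldl_congr_mem _ _
      (fun count j => count + ∑ k ∈ Finset.Ico (j + 1) n,
        (if PySem.List.pyGetD nums i 0 + PySem.List.pyGetD nums j 0 + PySem.List.pyGetD nums k 0 = 0
         then (1 : Int) else 0)) c (fun acc j _ => h1 acc i j)]
    rw [PySem.List.foldl_add, tsSum_map_pyRange]
  rw [PySem.List.foldl_congr_mem _ _
    (fun count i => count + ∑ j ∈ Finset.Ico (i + 1) (n - 1), ∑ k ∈ Finset.Ico (j + 1) n,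
      (if PySem.List.pyGetD nums i 0 + PySem.List.pyGetD nums j 0 + PySem.List.pyGetD nums k 0 = 0
       then (1 : Int) else 0)) 0 (fun acc i _ => h2 acc i)]
  rw [PySem.List.foldl_add, tsSum_map_pyRange, zero_add]
  rfl

-- A's sums extended to the full cube with indicators
lemma tsA_cube (nums : List Int) :
    (∑ i ∈ Finset.Ico (0 : Int) ((nums.length : Int) - 2),
        ∑ j ∈ Finset.Ico (i + 1) ((nums.length : Int) - 1),
          ∑ k ∈ Finset.Ico (j + 1) (nums.length : Int),
            if tsGet nums i + tsGet nums j + tsGet nums k = 0 then (1 : Int) else 0)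
      = ∑ i ∈ Finset.Ico (0 : Int) (nums.length : Int),
          ∑ j ∈ Finset.Ico (0 : Int) (nums.length : Int),
            ∑ k ∈ Finset.Ico (0 : Int) (nums.length : Int), tsInd nums i j k := by
  set n : Int := (nums.length : Int) with hn
  rw [tsSum_Ico_extend _ 0 (n - 2) 0 n le_rfl (by omega)]
  refine Finset.sum_congr rfl fun i hi => ?_
  simp only [Finset.mem_Ico] at hi
  by_cases hic : (0 : Int) ≤ i ∧ i < n - 2
  · rw [if_pos hic, tsSum_Ico_extend _ (i + 1) (n - 1) 0 n (by omega) (by omega)]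
    refine Finset.sum_congr rfl fun j hj => ?_
    simp only [Finset.mem_Ico] at hj
    by_cases hjc : i + 1 ≤ j ∧ j < n - 1
    · rw [if_pos hjc, tsSum_Ico_extend _ (j + 1) n 0 n (by omega) le_rfl]
      refine Finset.sum_congr rfl fun k hk => ?_
      simp only [Finset.mem_Ico] at hk
      simp only [tsInd]
      split_ifs <;> omega
    · rw [if_neg hjc]
      refine (Finset.sum_eq_zero fun k hk => ?_).symm
      simp only [Finset.mem_Ico] at hk
      simp only [tsInd]
      split_ifs <;> omega
  · rw [if_neg hic]
    refine (Finset.sum_eq_zero fun j hj => Finset.sum_eq_zero fun k hk => ?_).symm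
    simp only [Finset.mem_Ico] at hj hk
    simp only [tsInd]
    split_ifs <;> omega

-- the counter dict reads back as a prefix count
lemma tsCnt_getD (nums : List Int) (m : Nat) (v : Int) :
    (tsCnt nums m).getD v 0 = ((nums.take m).count v : Int) := by
  have h0 : (PySem.Dict.mk ([] : List (Int × Int))).getD v 0 = 0 := rfl
  simp only [tsCnt]
  rw [PySem.Dict.getD_foldl_modify_add_one, h0, zero_add]

-- B's loop invariant: state after the first m middle indices
lemma tsB_loop (nums : List Int) : ∀ m : Nat, m ≤ nums.length →
    (PySem.List.pyRange 0 (m : Int)).foldl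
      (fun (st : Int × PySem.Dict Int Int) j =>
        ((PySem.List.pyRange (j + 1) (nums.length : Int)).foldl
            (fun c k => c + st.2.getD (-(PySem.List.pyGetD nums j 0 + PySem.List.pyGetD nums k 0)) 0)
            st.1,
          st.2.modify (PySem.List.pyGetD nums j 0) 0 (fun t => t + 1)))
      (0, PySem.Dict.mk [])
      = (tsBsum nums m, tsCnt nums m) := by
  intro m
  induction m with
  | zero =>
    intro _
    rw [show ((0 : Nat) : Int) = 0 from rfl, tsRange_nil le_rfl]
    simp [tsBsum, tsCnt]
  | succ m ih =>
    intro h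
    have hm : m ≤ nums.length := Nat.le_of_succ_le h
    have hmlt : m < nums.length := h
    rw [show ((m + 1 : Nat) : Int) = (m : Int) + 1 by push_cast; ring,
      PySem.List.pyRange_one_succ_right (Int.natCast_nonneg m), List.foldl_append, ih hm]
    simp only [List.foldl_cons, List.foldl_nil]
    have hx : PySem.List.pyGetD nums (m : Int) 0 = nums[m] := by
      rw [PySem.List.pyGetD_natCast, List.getD_eq_getElem _ _ hmlt]
    refine Prod.ext ?_ ?_
    · show (PySem.List.pyRange ((m : Int) + 1) (nums.length : Int)).foldl
        (fun c k => c + (tsCnt nums m).getD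
          (-(PySem.List.pyGetD nums (m : Int) 0 + PySem.List.pyGetD nums k 0)) 0) (tsBsum nums m)
        = tsBsum nums (m + 1)
      rw [PySem.List.foldl_add, tsSum_map_pyRange]
      rw [show tsBsum nums (m + 1)
          = tsBsum nums m + ∑ k ∈ Finset.Ico ((m : Int) + 1) (nums.length : Int),
              ((nums.take (m : Int).toNat).count (-(tsGet nums (m : Int) + tsGet nums k)) : Int) by
        simp only [tsBsum]
        rw [show ((m + 1 : Nat) : Int) = (m : Int) + 1 by push_cast; ring,
          tsSum_Ico_top 0 (m : Int) (Int.natCast_nonneg m)]]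
      simp only [tsGet, Int.toNat_natCast]
      congr 1
      refine Finset.sum_congr rfl fun k _ => ?_
      rw [tsCnt_getD]
    · show (tsCnt nums m).modify (PySem.List.pyGetD nums (m : Int) 0) 0 (fun t => t + 1)
        = tsCnt nums (m + 1)
      rw [hx]
      simp only [tsCnt]
      rw [List.take_add_one, List.foldl_append,
        show nums[m]?.toList = [nums[m]] by rw [List.getElem?_eq_getElem hmlt]; rfl]
      simp

-- B's port equals its accumulated sum over all middle indices
lemma tsB_eq (nums : List Int) :
    count_three_sum_zero_alt nums = tsBsum nums nums.length := by
  simp only [count_three_sum_zero_alt, PySem.List.len]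
  rw [tsB_loop nums nums.length le_rfl]

-- prefix counts as interval sums
lemma tsCount_take (nums : List Int) (v : Int) : ∀ m : Nat, m ≤ nums.length →
    ((nums.take m).count v : Int)
      = ∑ i ∈ Finset.Ico (0 : Int) (m : Int), if tsGet nums i = v then 1 else 0 := by
  intro m
  induction m with
  | zero => intro _; simp
  | succ m ih =>
    intro h
    have hm : m ≤ nums.length := Nat.le_of_succ_le h
    have hmlt : m < nums.length := h
    rw [List.take_add_one, List.count_append,
      show nums[m]?.toList = [nums[m]] by rw [List.getElem?_eq_getElem hmlt]; rfl]
    push_cast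
    rw [ih hm, tsSum_Ico_top 0 (m : Int) (Int.natCast_nonneg m)]
    have hx : tsGet nums (m : Int) = nums[m] := by
      rw [tsGet, PySem.List.pyGetD_natCast, List.getD_eq_getElem _ _ hmlt]
    congr 1
    rw [hx]
    rcases eq_or_ne nums[m] v with hv | hv <;>
      simp [hv]

-- B's sum as nested interval sums of indicators
lemma tsB_sum (nums : List Int) :
    tsBsum nums nums.length
      = ∑ j ∈ Finset.Ico (0 : Int) (nums.length : Int),
          ∑ k ∈ Finset.Ico (j + 1) (nums.length : Int),
            ∑ i ∈ Finset.Ico (0 : Int) j,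
              if tsGet nums i + tsGet nums j + tsGet nums k = 0 then (1 : Int) else 0 := by
  simp only [tsBsum]
  refine Finset.sum_congr rfl fun j hj => Finset.sum_congr rfl fun k hk => ?_
  simp only [Finset.mem_Ico] at hj hk
  have hjt : ((j.toNat : Nat) : Int) = j := Int.toNat_of_nonneg hj.1
  have hjle : j.toNat ≤ nums.length := by omega
  rw [tsCount_take nums _ j.toNat hjle, hjt]
  refine Finset.sum_congr rfl fun i _ => ?_
  have : (tsGet nums i = -(tsGet nums j + tsGet nums k))
      ↔ (tsGet nums i + tsGet nums j + tsGet nums k = 0) := by omega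
  simp only [this]

-- B's sums extended to the full cube with indicators (j, k, i order)
lemma tsB_cube (nums : List Int) :
    (∑ j ∈ Finset.Ico (0 : Int) (nums.length : Int),
        ∑ k ∈ Finset.Ico (j + 1) (nums.length : Int),
          ∑ i ∈ Finset.Ico (0 : Int) j,
            if tsGet nums i + tsGet nums j + tsGet nums k = 0 then (1 : Int) else 0)
      = ∑ j ∈ Finset.Ico (0 : Int) (nums.length : Int),
          ∑ k ∈ Finset.Ico (0 : Int) (nums.length : Int),
            ∑ i ∈ Finset.Ico (0 : Int) (nums.length : Int), tsInd nums i j k := by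
  set n : Int := (nums.length : Int) with hn
  refine Finset.sum_congr rfl fun j hj => ?_
  simp only [Finset.mem_Ico] at hj
  rw [tsSum_Ico_extend _ (j + 1) n 0 n (by omega) le_rfl]
  refine Finset.sum_congr rfl fun k hk => ?_
  simp only [Finset.mem_Ico] at hk
  by_cases hkc : j + 1 ≤ k ∧ k < n
  · rw [if_pos hkc, tsSum_Ico_extend _ 0 j 0 n le_rfl (by omega)]
    refine Finset.sum_congr rfl fun i hi => ?_
    simp only [Finset.mem_Ico] at hi
    simp only [tsInd]
    split_ifs <;> omega
  · rw [if_neg hkc]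
    refine (Finset.sum_eq_zero fun i hi => ?_).symm
    simp only [Finset.mem_Ico] at hi
    simp only [tsInd]
    split_ifs <;> omega

-- reorder the cube: summing over i outermost equals summing over j outermost
lemma tsCube_comm (nums : List Int) :
    (∑ i ∈ Finset.Ico (0 : Int) (nums.length : Int),
        ∑ j ∈ Finset.Ico (0 : Int) (nums.length : Int),
          ∑ k ∈ Finset.Ico (0 : Int) (nums.length : Int), tsInd nums i j k)
      = ∑ j ∈ Finset.Ico (0 : Int) (nums.length : Int),
          ∑ k ∈ Finset.Ico (0 : Int) (nums.length : Int),
            ∑ i ∈ Finset.Ico (0 : Int) (nums.length : Int), tsInd nums i j k := by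
  rw [Finset.sum_comm]
  exact Finset.sum_congr rfl fun j _ => Finset.sum_comm

-- ===== VERDICT (by name: the statement is the Claim_ definition above) =====
theorem count_three_sum_zero_spec : Claim_equal_count_three_sum_zero := by
  intro nums _
  show count_three_sum_zero nums = count_three_sum_zero_alt nums
  rw [tsA_eq, tsA_cube, tsCube_comm, tsB_eq, tsB_sum, tsB_cube]
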